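-- pv_equiv track=rewrite | github.com/anerecye/New-project | src/run_vital_annotation_mvp.py | trim_variant
-- ===== SOURCE A (Python) =====
-- def trim_variant(pos: int, ref: object, alt: object) -> tuple[int, str, str]:
--     ref_text = str(ref).strip().upper()
--     alt_text = str(alt).strip().upper()
--     current_pos = int(pos)
--
--     while len(ref_text) > 1 and len(alt_text) > 1 and ref_text[-1] == alt_text[-1]:
--         ref_text = ref_text[:-1]
--         alt_text = alt_text[:-1]
--
--     while len(ref_text) > 1 and len(alt_text) > 1 and ref_text[0] == alt_text[0]:
--         ref_text = ref_text[1:]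
--         alt_text = alt_text[1:]
--         current_pos += 1
--
--     return current_pos, ref_text, alt_text
-- ===== SOURCE B (Python) =====
-- def trim_variant(pos: int, ref: object, alt: object) -> tuple[int, str, str]:
--     r = str(ref).strip().upper()
--     a = str(alt).strip().upper()
--     lr, la = len(r), len(a)
--     # count the stepwise common suffix, then clamp so at least one char remains in each
--     s = 0
--     m = min(lr, la)
--     while s < m and r[lr - 1 - s] == a[la - 1 - s]:
--         s += 1
--     k = max(0, min(s, lr - 1, la - 1))
--     lr -= k
--     la -= k
--     # count the common prefix of the suffix-trimmed strings, clamped the same way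
--     p = 0
--     m = min(lr, la)
--     while p < m and r[p] == a[p]:
--         p += 1
--     p = max(0, min(p, lr - 1, la - 1))
--     return int(pos) + p, r[p:lr], a[p:la]
-- ===== Notes on version B (the rewrite author's own statement) =====
-- stated objective: faster
-- what changed: Instead of repeatedly slicing one character off the strings in two while loops (each slice copies the whole string), B counts the matching suffix and prefix characters by index in two scans and slices each string exactly once.
import Mathlib
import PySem

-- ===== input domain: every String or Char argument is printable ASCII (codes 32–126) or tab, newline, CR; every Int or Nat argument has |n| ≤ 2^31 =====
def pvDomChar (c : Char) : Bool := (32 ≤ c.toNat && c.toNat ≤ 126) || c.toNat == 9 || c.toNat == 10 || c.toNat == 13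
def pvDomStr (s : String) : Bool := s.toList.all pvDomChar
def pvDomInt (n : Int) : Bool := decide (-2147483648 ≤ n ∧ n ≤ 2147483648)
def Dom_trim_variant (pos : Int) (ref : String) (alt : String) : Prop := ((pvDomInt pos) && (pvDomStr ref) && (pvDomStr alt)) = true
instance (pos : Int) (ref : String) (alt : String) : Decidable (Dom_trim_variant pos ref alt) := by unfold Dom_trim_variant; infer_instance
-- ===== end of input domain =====

-- B trims by counting matching suffix/prefix chars and slicing once (O(n)) instead of
-- A's char-by-char re-slicing loops (O(n^2)); return values agree on all inputs.

-- ===== PORT A =====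
-- first while loop: drop the last char while both lengths > 1 and the last chars agree
def trimSufLoop (r a : List Char) : List Char × List Char :=
  if r.length > 1 ∧ a.length > 1 ∧ r.getLast? = a.getLast? then
    trimSufLoop r.dropLast a.dropLast
  else (r, a)
termination_by r.length
decreasing_by simp [List.length_dropLast]; omega

-- second while loop: drop the first char and bump pos while both lengths > 1 and first chars agree
def trimPreLoop (pos : Int) (r a : List Char) : Int × List Char × List Char :=
  if r.length > 1 ∧ a.length > 1 ∧ r.head? = a.head? then
    trimPreLoop (pos + 1) r.tail a.tail
  else (pos, r, a)
termination_by r.length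
decreasing_by simp [List.length_tail]; omega

def trim_variant (pos : Int) (ref : String) (alt : String) : Int × String × String :=
  let r := PySem.Chars.upper (PySem.Chars.strip ref.toList)
  let a := PySem.Chars.upper (PySem.Chars.strip alt.toList)
  let ra := trimSufLoop r a
  let out := trimPreLoop pos ra.1 ra.2
  (out.1, String.ofList out.2.1, String.ofList out.2.2)

-- ===== PORT B =====
-- stepwise count of matching leading characters (Source B's index scan, expressed structurally)
def cpl : List Char → List Char → Nat
  | x :: xs, y :: ys => if x = y then 1 + cpl xs ys else 0
  | _, _ => 0

-- Nat subtraction truncates at 0, which is exactly Source B's max(0, min(s, lr-1, la-1)) clamp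
def trim_variant_alt (pos : Int) (ref : String) (alt : String) : Int × String × String :=
  let r := PySem.Chars.upper (PySem.Chars.strip ref.toList)
  let a := PySem.Chars.upper (PySem.Chars.strip alt.toList)
  let lr := r.length
  let la := a.length
  let k := min (cpl r.reverse a.reverse) (min (lr - 1) (la - 1))
  let r1 := r.take (lr - k)
  let a1 := a.take (la - k)
  let p := min (cpl r1 a1) (min (lr - k - 1) (la - k - 1))
  (pos + p, String.ofList (r1.drop p), String.ofList (a1.drop p))

-- ===== PRECONDITION & SPEC =====
def Spec_trim_variant (pos : Int) (ref : String) (alt : String) (out : Int × String × String) : Prop := out = trim_variant_alt pos ref alt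
instance (pos : Int) (ref : String) (alt : String) (out : Int × String × String) : Decidable (Spec_trim_variant pos ref alt out) := by unfold Spec_trim_variant; infer_instance

-- ===== CLAIM (what is proved, stated in full; the proofs are below) =====
def Claim_equal_trim_variant : Prop := ∀ (pos : Int) (ref : String) (alt : String), Dom_trim_variant pos ref alt → Spec_trim_variant pos ref alt (trim_variant pos ref alt)

-- ===== LEMMAS AND PROOFS =====

def pfxCnt (r a : List Char) : Nat := min (cpl r a) (min (r.length - 1) (a.length - 1))

def sfxCnt (r a : List Char) : Nat := min (cpl r.reverse a.reverse) (min (r.length - 1) (a.length - 1))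

lemma cpl_le_left (r a : List Char) : cpl r a ≤ r.length := by
  induction r generalizing a with
  | nil => simp [cpl]
  | cons x xs ih =>
    cases a with
    | nil => simp [cpl]
    | cons y ys =>
      simp only [cpl]
      split
      · simpa [Nat.add_comm] using Nat.succ_le_succ (ih ys)
      · omega

lemma trimPreLoop_eq (r a : List Char) (pos : Int) :
    trimPreLoop pos r a = (pos + (pfxCnt r a : Int), r.drop (pfxCnt r a), a.drop (pfxCnt r a)) := by
  induction r generalizing a pos with
  | nil => rw [trimPreLoop]; simp [pfxCnt]
  | cons x xs ih =>
    cases a with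
    | nil => rw [trimPreLoop]; simp [pfxCnt]
    | cons y ys =>
      rw [trimPreLoop]
      by_cases hxy : x = y
      · subst hxy
        by_cases hx : xs.length ≥ 1 ∧ ys.length ≥ 1
        · rw [if_pos (by simp; omega), List.tail_cons, List.tail_cons, ih ys (pos + 1)]
          have hstep : pfxCnt (x :: xs) (x :: ys) = pfxCnt xs ys + 1 := by
            have h1 := cpl_le_left xs ys
            simp only [pfxCnt, cpl, if_true, List.length_cons]
            omega
          rw [hstep]
          refine Prod.ext ?_ (Prod.ext ?_ ?_)
          · push_cast; ring
          · simp [List.drop_succ_cons]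
          · simp [List.drop_succ_cons]
        · rw [if_neg (by rintro ⟨h1, h2, -⟩; simp at h1 h2; omega)]
          have : pfxCnt (x :: xs) (x :: ys) = 0 := by
            simp only [pfxCnt, List.length_cons]; omega
          simp [this]
      · rw [if_neg (by simp [hxy])]
        have : pfxCnt (x :: xs) (y :: ys) = 0 := by
          simp only [pfxCnt, cpl, if_neg hxy]; omega
        simp [this]

lemma trimSufLoop_eq (r a : List Char) :
    trimSufLoop r a = (r.take (r.length - sfxCnt r a), a.take (a.length - sfxCnt r a)) := by
  generalize hn : r.length = n
  induction n generalizing r a with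
  | zero => rw [trimSufLoop]; simp_all [sfxCnt]
  | succ n ih =>
    by_cases hg : r.length > 1 ∧ a.length > 1 ∧ r.getLast? = a.getLast?
    · rw [trimSufLoop, if_pos hg]
      obtain ⟨hr, ha, hlast⟩ := hg
      have hrd : r.dropLast.length = n := by simp [List.length_dropLast]; omega
      rw [ih r.dropLast a.dropLast hrd]
      have hrrev : r.reverse = r.getLast?.toList ++ r.dropLast.reverse := by
        cases r using List.reverseRecOn with
        | nil => simp at hr
        | append_singleton rs x => simp
      have harev : a.reverse = a.getLast?.toList ++ a.dropLast.reverse := by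
        cases a using List.reverseRecOn with
        | nil => simp at ha
        | append_singleton as y => simp
      obtain ⟨x, hx⟩ : ∃ x, r.getLast? = some x := by
        cases h : r.getLast? with
        | none => rw [List.getLast?_eq_none_iff] at h; simp [h] at hr
        | some x => exact ⟨x, rfl⟩
      have hstep : sfxCnt r a = sfxCnt r.dropLast a.dropLast + 1 := by
        have h1 := cpl_le_left r.dropLast.reverse a.dropLast.reverse
        simp only [List.length_reverse] at h1
        simp only [sfxCnt, hrrev, harev, hx, hlast ▸ hx, Option.toList_some,
          List.singleton_append, cpl, if_true, List.length_dropLast]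
        omega
      rw [hstep]
      have hk : sfxCnt r.dropLast a.dropLast ≤ min (r.dropLast.length - 1) (a.dropLast.length - 1) := by
        simp [sfxCnt]
      simp only [List.length_dropLast, hrd] at hk
      have htr : r.dropLast.take (n - sfxCnt r.dropLast a.dropLast)
          = r.take (r.length - (sfxCnt r.dropLast a.dropLast + 1)) := by
        rw [List.dropLast_eq_take, List.take_take]
        congr 1
        omega
      have hta : a.dropLast.take (a.dropLast.length - sfxCnt r.dropLast a.dropLast)
          = a.take (a.length - (sfxCnt r.dropLast a.dropLast + 1)) := by
        rw [List.dropLast_eq_take, List.take_take]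
        congr 1
        simp only [List.length_take]
        omega
      rw [htr, hta, hn]
    · rw [trimSufLoop, if_neg hg]
      have h0 : sfxCnt r a = 0 := by
        by_cases hr : r.length ≤ 1
        · simp only [sfxCnt]; omega
        by_cases ha : a.length ≤ 1
        · simp only [sfxCnt]; omega
        have hlast : r.getLast? ≠ a.getLast? := by
          intro h; exact hg ⟨by omega, by omega, h⟩
        have hc : cpl r.reverse a.reverse = 0 := by
          cases hr' : r.reverse with
          | nil => simp [cpl]
          | cons x xs =>
            cases ha' : a.reverse with
            | nil => simp [cpl]
            | cons y ys =>
              have hx : r.getLast? = some x := by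
                rw [← List.head?_reverse, hr']; rfl
              have hy : a.getLast? = some y := by
                rw [← List.head?_reverse, ha']; rfl
              have hne : x ≠ y := by
                intro h; apply hlast; rw [hx, hy, h]
              simp [cpl, hne]
        simp [sfxCnt, hc]
      have e1 : n + 1 - sfxCnt r a = r.length := by omega
      have e2 : a.length - sfxCnt r a = a.length := by omega
      rw [e1, e2, List.take_length, List.take_length]

-- ===== VERDICT (by name: the statement is the Claim_ definition above) =====
theorem trim_variant_spec : Claim_equal_trim_variant := by
  intro pos ref alt _
  unfold Spec_trim_variant trim_variant trim_variant_alt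
  simp only [trimSufLoop_eq, trimPreLoop_eq]
  set r := PySem.Chars.upper (PySem.Chars.strip ref.toList) with hr
  set a := PySem.Chars.upper (PySem.Chars.strip alt.toList) with ha
  have h1 : (r.take (r.length - sfxCnt r a)).length = r.length - sfxCnt r a := by simp
  have h2 : (a.take (a.length - sfxCnt r a)).length = a.length - sfxCnt r a := by simp
  simp only [sfxCnt] at h1 h2
  simp only [pfxCnt, sfxCnt, h1, h2]
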